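-- pv_equiv track=rewrite | github.com/aaalvarito/MECATRONICA-2023-2024 | music/get_song_notes.py | convert_clave_sol_to_numbers
-- ===== SOURCE A (Python) =====
-- def convert_clave_sol_to_numbers(notes):
--     # Asignar números a las notas en función de la tabla de equivalencia
--     equivalence_table = {
--         'Do0': 1,  'Do#0': 2,  'Re0': 3,  'Re#0': 4,  'Mi0': 5,  'Fa0': 6,  'Fa#0': 7,  'Sol0': 8,  'Sol#0': 9,  'La0': 10, 'La#0': 11, 'Si0': 12,
--         'Do1': 13, 'Do#1': 14, 'Re1': 15, 'Re#1': 16, 'Mi1': 17, 'Fa1': 18, 'Fa#1': 19, 'Sol1': 20, 'Sol#1': 21, 'La1': 22, 'La#1': 23, 'Si1': 24,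
--         'Do2': 25, 'Do#2': 26, 'Re2': 27, 'Re#2': 28, 'Mi2': 29, 'Fa2': 30, 'Fa#2': 31, 'Sol2': 32, 'Sol#2': 33, 'La2': 34, 'La#2': 35, 'Si2': 36,
--         'Do3': 37, 'Do#3': 38, 'Re3': 39, 'Re#3': 40, 'Mi3': 41, 'Fa3': 42, 'Fa#3': 43, 'Sol3': 44, 'Sol#3': 45, 'La3': 46, 'La#3': 47, 'Si3': 48,
--         'Do4': 49, 'Do#4': 50, 'Re4': 51, 'Re#4': 52, 'Mi4': 53, 'Fa4': 54, 'Fa#4': 55, 'Sol4': 56, 'Sol#4': 57, 'La4': 58, 'La#4': 59, 'Si4': 60,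
--         'Do5': 61, 'Do#5': 62, 'Re5': 63, 'Re#5': 64, 'Mi5': 65, 'Fa5': 66, 'Fa#5': 67, 'Sol5': 68, 'Sol#5': 69, 'La5': 70, 'La#5': 71, 'Si5': 72,
--         'Do6': 73, 'Do#6': 74, 'Re6': 75, 'Re#6': 76, 'Mi6': 77, 'Fa6': 78, 'Fa#6': 79, 'Sol6': 80, 'Sol#6': 81, 'La6': 82, 'La#6': 83, 'Si6': 84,
--         'Do7': 85, 'Do#7': 86, 'Re7': 87, 'Re#7': 88, 'Mi7': 89, 'Fa7': 90, 'Fa#7': 91, 'Sol7': 92, 'Sol#7': 93, 'La7': 94, 'La#7': 95, 'Si7': 96,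
--         'Do8': 97, 'Do#8': 98, 'Re8': 99, 'Re#8': 100,'Mi8': 101,'Fa8': 102,'Fa#8': 103,'Sol8': 104,'Sol#8': 105,'La8': 106,'La#8': 107,'Si8': 108
--     }
--
--     converted_notes = []
--     for note in notes:
--         if note in equivalence_table:
--             converted_notes.append(equivalence_table[note])
--     return converted_notes
-- ===== SOURCE B (Python) =====
-- # B: parse each note as base-name + octave digit and compute 12*octave + offset + 1,
-- # instead of A's 108-entry lookup table; objective: simpler (same asymptotic cost).
-- _BASE = {'Do': 0, 'Do#': 1, 'Re': 2, 'Re#': 3, 'Mi': 4, 'Fa': 5,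
--          'Fa#': 6, 'Sol': 7, 'Sol#': 8, 'La': 9, 'La#': 10, 'Si': 11}
--
-- def convert_clave_sol_to_numbers(notes):
--     result = []
--     for note in notes:
--         if not note:
--             continue
--         base, oct_ch = note[:-1], note[-1]
--         if base in _BASE and '0' <= oct_ch <= '8':
--             result.append(12 * (ord(oct_ch) - 48) + _BASE[base] + 1)
--     return result
-- ===== Notes on version B (the rewrite author's own statement) =====
-- stated objective: simpler
-- what changed: Replaces the hand-written 108-entry equivalence table and membership filter with a 12-entry base-note map plus arithmetic on the parsed octave digit (12*octave + offset + 1).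
import Mathlib
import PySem

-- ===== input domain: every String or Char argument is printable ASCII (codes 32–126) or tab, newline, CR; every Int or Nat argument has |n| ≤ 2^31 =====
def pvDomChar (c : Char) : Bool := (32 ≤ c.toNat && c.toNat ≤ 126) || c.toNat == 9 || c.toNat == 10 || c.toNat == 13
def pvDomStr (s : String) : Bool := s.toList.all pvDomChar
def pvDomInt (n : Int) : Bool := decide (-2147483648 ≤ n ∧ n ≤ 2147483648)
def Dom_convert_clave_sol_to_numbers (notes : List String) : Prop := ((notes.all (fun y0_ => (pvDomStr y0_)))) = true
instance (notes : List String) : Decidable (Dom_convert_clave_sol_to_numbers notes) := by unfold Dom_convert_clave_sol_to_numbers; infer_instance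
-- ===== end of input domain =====

-- B replaces A's 108-entry lookup table with a 12-entry base map plus octave arithmetic; objective: simpler. Both total, equal on all inputs.

-- ===== PORT A =====
-- A's literal equivalence table (dict literal, insertion order)
def pvTable : PySem.Dict String Int := PySem.Dict.ofList
  [("Do0", 1), ("Do#0", 2), ("Re0", 3), ("Re#0", 4), ("Mi0", 5), ("Fa0", 6), ("Fa#0", 7), ("Sol0", 8), ("Sol#0", 9), ("La0", 10), ("La#0", 11), ("Si0", 12),
   ("Do1", 13), ("Do#1", 14), ("Re1", 15), ("Re#1", 16), ("Mi1", 17), ("Fa1", 18), ("Fa#1", 19), ("Sol1", 20), ("Sol#1", 21), ("La1", 22), ("La#1", 23), ("Si1", 24),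
   ("Do2", 25), ("Do#2", 26), ("Re2", 27), ("Re#2", 28), ("Mi2", 29), ("Fa2", 30), ("Fa#2", 31), ("Sol2", 32), ("Sol#2", 33), ("La2", 34), ("La#2", 35), ("Si2", 36),
   ("Do3", 37), ("Do#3", 38), ("Re3", 39), ("Re#3", 40), ("Mi3", 41), ("Fa3", 42), ("Fa#3", 43), ("Sol3", 44), ("Sol#3", 45), ("La3", 46), ("La#3", 47), ("Si3", 48),
   ("Do4", 49), ("Do#4", 50), ("Re4", 51), ("Re#4", 52), ("Mi4", 53), ("Fa4", 54), ("Fa#4", 55), ("Sol4", 56), ("Sol#4", 57), ("La4", 58), ("La#4", 59), ("Si4", 60),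
   ("Do5", 61), ("Do#5", 62), ("Re5", 63), ("Re#5", 64), ("Mi5", 65), ("Fa5", 66), ("Fa#5", 67), ("Sol5", 68), ("Sol#5", 69), ("La5", 70), ("La#5", 71), ("Si5", 72),
   ("Do6", 73), ("Do#6", 74), ("Re6", 75), ("Re#6", 76), ("Mi6", 77), ("Fa6", 78), ("Fa#6", 79), ("Sol6", 80), ("Sol#6", 81), ("La6", 82), ("La#6", 83), ("Si6", 84),
   ("Do7", 85), ("Do#7", 86), ("Re7", 87), ("Re#7", 88), ("Mi7", 89), ("Fa7", 90), ("Fa#7", 91), ("Sol7", 92), ("Sol#7", 93), ("La7", 94), ("La#7", 95), ("Si7", 96),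
   ("Do8", 97), ("Do#8", 98), ("Re8", 99), ("Re#8", 100), ("Mi8", 101), ("Fa8", 102), ("Fa#8", 103), ("Sol8", 104), ("Sol#8", 105), ("La8", 106), ("La#8", 107), ("Si8", 108)]

def convert_clave_sol_to_numbers (notes : List String) : List Int :=
  notes.foldl
    (fun converted_notes note =>
      if pvTable.contains note then converted_notes ++ [pvTable.getD note 0]
      else converted_notes)
    []

-- ===== PORT B =====
def pvBase : PySem.Dict String Int := PySem.Dict.ofList
  [("Do", 0), ("Do#", 1), ("Re", 2), ("Re#", 3), ("Mi", 4), ("Fa", 5),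
   ("Fa#", 6), ("Sol", 7), ("Sol#", 8), ("La", 9), ("La#", 10), ("Si", 11)]

-- the body of B's per-note loop: '' is skipped; base = note[:-1], oct_ch = note[-1];
-- emits 12*(ord(oct_ch)-48) + BASE[base] + 1 when base ∈ BASE and '0' ≤ oct_ch ≤ '8'
def pvParse (note : String) : Option Int :=
  if note.toList = [] then none
  else
    match PySem.Str.pyGet? note (-1) with
    | none => none
    | some oct_ch =>
      match pvBase.get? (PySem.Str.slice note none (some (-1))) with
      | none => none
      | some off =>
        if '0' ≤ oct_ch ∧ oct_ch ≤ '8' then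
          some (12 * ((oct_ch.toNat : Int) - 48) + off + 1)
        else none

def convert_clave_sol_to_numbers_alt (notes : List String) : List Int :=
  notes.foldl
    (fun result note =>
      match pvParse note with
      | some v => result ++ [v]
      | none => result)
    []

-- ===== PRECONDITION & SPEC =====
def Spec_convert_clave_sol_to_numbers (notes : List String) (out : List Int) : Prop := out = convert_clave_sol_to_numbers_alt notes
instance (notes : List String) (out : List Int) : Decidable (Spec_convert_clave_sol_to_numbers notes out) := by unfold Spec_convert_clave_sol_to_numbers; infer_instance

-- ===== CLAIM (what is proved, stated in full; the proofs are below) =====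
def Claim_equal_convert_clave_sol_to_numbers : Prop := ∀ (notes : List String), Dom_convert_clave_sol_to_numbers notes → Spec_convert_clave_sol_to_numbers notes (convert_clave_sol_to_numbers notes)

-- ===== LEMMAS AND PROOFS =====

set_option maxHeartbeats 4000000 in
set_option maxRecDepth 10000 in
theorem pvTable_nodup : pvTable.keys.Nodup := by decide

set_option maxHeartbeats 4000000 in
set_option maxRecDepth 10000 in
theorem pvParse_of_mem : ∀ p ∈ pvTable.items, pvParse p.1 = some p.2 := by decide

-- every (base, offset) of pvBase combined with an octave digit names a key of pvTable carrying the computed value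
set_option maxHeartbeats 10000000 in
set_option maxRecDepth 4000 in
theorem pvKeyL : ∀ bp ∈ pvBase.items, ∀ c ∈ (['0','1','2','3','4','5','6','7','8'] : List Char),
    ∃ p ∈ pvTable.items, p.1.toList = bp.1.toList ++ [c] ∧ p.2 = 12 * ((c.toNat : Int) - 48) + bp.2 + 1 := by
  intro bp hbp
  fin_cases hbp <;> (intro c hc; fin_cases hc) <;> decide

theorem pvChar_digit (c : Char) (h1 : '0' ≤ c) (h2 : c ≤ '8') :
    c ∈ (['0','1','2','3','4','5','6','7','8'] : List Char) := by
  have hv1 : 48 ≤ c.val.toNat := by simpa [Char.le_def, UInt32.le_iff_toNat_le] using h1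
  have hv2 : c.val.toNat ≤ 56 := by simpa [Char.le_def, UInt32.le_iff_toNat_le] using h2
  simp only [List.mem_cons, List.not_mem_nil, or_false, Char.ext_iff, ← UInt32.toNat_inj,
    show '0'.val.toNat = 48 from rfl, show '1'.val.toNat = 49 from rfl,
    show '2'.val.toNat = 50 from rfl, show '3'.val.toNat = 51 from rfl,
    show '4'.val.toNat = 52 from rfl, show '5'.val.toNat = 53 from rfl,
    show '6'.val.toNat = 54 from rfl, show '7'.val.toNat = 55 from rfl,
    show '8'.val.toNat = 56 from rfl]
  omega

theorem pvParse_eq_get? (s : String) : pvParse s = pvTable.get? s := by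
  cases hp : pvParse s with
  | none =>
    cases hg : pvTable.get? s with
    | none => rfl
    | some v =>
      have hmem := PySem.Dict.mem_items_of_get?_eq_some _ hg
      have := pvParse_of_mem _ hmem
      simp only at this
      rw [hp] at this
      exact absurd this (by simp)
  | some v =>
    have hne : ¬ s.toList = [] := by
      intro h
      rw [pvParse, if_pos h] at hp
      exact absurd hp (by simp)
    obtain ⟨l, c, hlc⟩ := (List.eq_nil_or_concat s.toList).resolve_left hne
    have hget : PySem.Str.pyGet? s (-1) = some c := by
      rw [show PySem.Str.pyGet? s (-1) = PySem.List.pyGet? s.toList (-1) from rfl, hlc]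
      simp [pysem]
    cases hb : pvBase.get? (PySem.Str.slice s none (some (-1))) with
    | none =>
      rw [pvParse, if_neg hne] at hp
      simp only [hget, hb] at hp
      exact absurd hp (by simp)
    | some off =>
      rw [pvParse, if_neg hne] at hp
      simp only [hget, hb] at hp
      split at hp
      case isTrue hdig =>
        have hbase : (PySem.Str.slice s none (some (-1))).toList = l := by
          rw [PySem.Str.slice_to_neg_one, hlc]; simp
        have hmemB := PySem.Dict.mem_items_of_get?_eq_some _ hb
        have hc := pvChar_digit c hdig.1 hdig.2
        obtain ⟨p, hpmem, hpl, hpv⟩ := pvKeyL _ hmemB c hc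
        have hs : p.1 = s := by
          apply String.toList_inj.mp
          rw [hpl, hbase, hlc]
          simp
        have hget2 : pvTable.get? s = some p.2 := by
          rw [← hs]
          exact PySem.Dict.get?_of_mem_items _ (by simpa using hpmem) pvTable_nodup
        rw [hget2, hpv, ← hp]
      case isFalse => exact absurd hp (by simp)

theorem pvStep (acc : List Int) (s : String) :
    (if pvTable.contains s then acc ++ [pvTable.getD s 0] else acc)
      = (match pvParse s with | some v => acc ++ [v] | none => acc) := by
  rw [pvParse_eq_get? s]
  cases hg : pvTable.get? s with
  | none =>
    rw [PySem.Dict.contains_eq_isSome_get?, hg]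
    simp only [Option.isSome_none, Bool.false_eq_true, if_false]
  | some v =>
    rw [PySem.Dict.contains_eq_isSome_get?, hg, PySem.Dict.getD_eq_get?_getD, hg]
    simp only [Option.isSome_some, if_true, Option.getD_some]

theorem pvFoldl_eq (notes : List String) (acc : List Int) :
    notes.foldl
      (fun converted_notes note =>
        if pvTable.contains note then converted_notes ++ [pvTable.getD note 0]
        else converted_notes) acc
    = notes.foldl
      (fun result note =>
        match pvParse note with
        | some v => result ++ [v]
        | none => result) acc := by
  induction notes generalizing acc with
  | nil => simp only [List.foldl_nil]
  | cons s rest ih =>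
    simp only [List.foldl_cons]
    rw [pvStep acc s]
    exact ih _

-- ===== VERDICT (by name: the statement is the Claim_ definition above) =====
theorem convert_clave_sol_to_numbers_spec : Claim_equal_convert_clave_sol_to_numbers := by
  intro notes _
  unfold Spec_convert_clave_sol_to_numbers convert_clave_sol_to_numbers convert_clave_sol_to_numbers_alt
  exact pvFoldl_eq notes []
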